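-- pv_equiv track=rewrite | github.com/VuBui217/dailycodingchallenge | 2025/november/check_fizz_buzz_sequence.py | is_fizz_buzz
-- ===== SOURCE A (Python) =====
-- def is_fizz_buzz(sequence):
--     n = len(sequence)
--
--     for i in range(n):
--         if (i + 1) % 15 == 0:
--             if sequence[i] != "FizzBuzz":
--                 return False
--         elif (i + 1) % 3 == 0:
--             if sequence[i] != "Fizz":
--                 return False
--         elif (i + 1) % 5 == 0:
--             if sequence[i] != "Buzz":
--                 return False
--         else:
--             if str(sequence[i]) != str(i + 1):
--                 return False
--     return True
-- ===== SOURCE B (Python) =====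
-- def is_fizz_buzz(sequence):
--     expected = []
--     for i in range(1, len(sequence) + 1):
--         token = ("Fizz" if i % 3 == 0 else "") + ("Buzz" if i % 5 == 0 else "")
--         expected.append(token if token else str(i))
--     return sequence == expected
-- ===== Notes on version B (the rewrite author's own statement) =====
-- stated objective: idiomatic
-- what changed: B builds the whole expected FizzBuzz list with an additive Fizz/Buzz token per position and compares it to the input with one list equality, instead of A's early-return loop with a four-way %15/%3/%5 branch per element.
import Mathlib
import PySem

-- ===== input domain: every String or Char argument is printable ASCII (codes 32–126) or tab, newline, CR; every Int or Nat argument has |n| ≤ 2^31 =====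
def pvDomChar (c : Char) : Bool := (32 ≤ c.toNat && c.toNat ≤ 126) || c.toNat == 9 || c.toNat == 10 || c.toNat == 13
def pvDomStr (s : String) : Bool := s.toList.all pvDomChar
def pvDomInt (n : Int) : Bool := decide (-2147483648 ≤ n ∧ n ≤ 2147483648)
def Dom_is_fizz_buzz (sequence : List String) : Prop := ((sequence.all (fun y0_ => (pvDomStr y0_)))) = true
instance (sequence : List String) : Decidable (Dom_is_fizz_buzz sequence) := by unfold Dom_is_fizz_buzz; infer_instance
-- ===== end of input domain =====

-- B is an idiomatic restructuring: build the expected FizzBuzz list and compare once; no speed claim.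

-- ===== PORT A =====
-- the 'for i in range(n)' loop with early returns, as structural recursion with the index counter
def fbGoA : List String → Nat → Bool
  | [], _ => true
  | s :: rest, i =>
    if (i + 1) % 15 == 0 then
      if s != "FizzBuzz" then false else fbGoA rest (i + 1)
    else if (i + 1) % 3 == 0 then
      if s != "Fizz" then false else fbGoA rest (i + 1)
    else if (i + 1) % 5 == 0 then
      if s != "Buzz" then false else fbGoA rest (i + 1)
    else
      -- str(sequence[i]) on a string is the string itself; str(i+1) is PySem.Int.toStr
      if s != PySem.Int.toStr ((i : Int) + 1) then false else fbGoA rest (i + 1)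

def is_fizz_buzz (sequence : List String) : Bool := fbGoA sequence 0

-- ===== PORT B =====
-- additive token for position number j+1
def fbExpected (j : Nat) : String :=
  let token := (if (j + 1) % 3 == 0 then "Fizz" else "") ++ (if (j + 1) % 5 == 0 then "Buzz" else "")
  if token == "" then PySem.Int.toStr ((j : Int) + 1) else token

def is_fizz_buzz_alt (sequence : List String) : Bool :=
  sequence == (List.range sequence.length).map fbExpected

-- ===== PRECONDITION & SPEC =====
def Spec_is_fizz_buzz (sequence : List String) (out : Bool) : Prop := out = is_fizz_buzz_alt sequence
instance (sequence : List String) (out : Bool) : Decidable (Spec_is_fizz_buzz sequence out) := by unfold Spec_is_fizz_buzz; infer_instance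

-- ===== CLAIM (what is proved, stated in full; the proofs are below) =====
def Claim_equal_is_fizz_buzz : Prop := ∀ (sequence : List String), Dom_is_fizz_buzz sequence → Spec_is_fizz_buzz sequence (is_fizz_buzz sequence)

-- ===== LEMMAS AND PROOFS =====
lemma decide_eq_beq_str (s x : String) : (decide (s = x)) = (s == x) := by
  cases h : s == x <;> simp_all

lemma fbGoA_eq_expected (l : List String) : ∀ k : Nat,
    fbGoA l k = (l == (List.range l.length).map (fun j => fbExpected (k + j))) := by
  induction l with
  | nil => intro k; simp [fbGoA]
  | cons s rest ih =>
    intro k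
    have hlen : List.range (s :: rest).length = 0 :: (List.range rest.length).map Nat.succ := by
      simp [List.range_succ_eq_map]
    rw [hlen]
    simp only [List.map_cons, List.map_map, List.cons_beq_cons, Nat.add_zero]
    have htail : fbGoA rest (k + 1)
        = (rest == (List.range rest.length).map ((fun j => fbExpected (k + j)) ∘ Nat.succ)) := by
      rw [ih (k + 1)]
      congr 1
      apply List.map_congr_left
      intro j _
      simp [Function.comp]
      ring_nf
    by_cases h15 : (k + 1) % 15 = 0
    · have h3 : (k + 1) % 3 = 0 := by omega
      have h5 : (k + 1) % 5 = 0 := by omega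
      have he : fbExpected k = "FizzBuzz" := by simp [fbExpected, h3, h5]
      simp [fbGoA, h15, he, htail, decide_eq_beq_str]
    · by_cases h3 : (k + 1) % 3 = 0
      · have h5 : (k + 1) % 5 ≠ 0 := by omega
        have he : fbExpected k = "Fizz" := by simp [fbExpected, h3, h5]
        simp [fbGoA, h15, h3, he, htail, decide_eq_beq_str]
      · by_cases h5 : (k + 1) % 5 = 0
        · have he : fbExpected k = "Buzz" := by simp [fbExpected, h3, h5]
          simp [fbGoA, h15, h3, h5, he, htail, decide_eq_beq_str]
        · have he : fbExpected k = PySem.Int.toStr ((k : Int) + 1) := by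
            simp [fbExpected, h3, h5]
          simp [fbGoA, h15, h3, h5, he, htail, decide_eq_beq_str]

-- ===== VERDICT (by name: the statement is the Claim_ definition above) =====
theorem is_fizz_buzz_spec : Claim_equal_is_fizz_buzz := by
  intro sequence _
  unfold Spec_is_fizz_buzz is_fizz_buzz is_fizz_buzz_alt
  rw [fbGoA_eq_expected sequence 0]
  congr 1
  apply List.map_congr_left
  intro j _
  simp
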